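-- pv_equiv track=rewrite | github.com/harmonylang/harmony | cxl.py | htmlstrsteps
-- ===== SOURCE A (Python) =====
-- def htmlstrsteps(steps):
--     if steps == None:
--         return "[]"
--     result = ""
--     i = 0
--     while i < len(steps):
--         if result != "":
--             result += " "
--         result += "<a href='#P%d'>%d"%(steps[i], steps[i])
--         j = i + 1
--         while j < len(steps) and steps[j] == steps[j - 1] + 1:
--             j += 1
--         if j > i + 1:
--             result += "-" + str(steps[j - 1])
--         result += "</a>"
--         i = j
--     return result
-- ===== SOURCE B (Python) =====
-- def htmlstrsteps(steps):
--     if steps is None: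
--         return "[]"
--     # Phase 1: materialise maximal consecutive runs as (start, end) pairs.
--     runs = []
--     for v in steps:
--         if runs and v == runs[-1][1] + 1:
--             runs[-1] = (runs[-1][0], v)
--         else:
--             runs.append((v, v))
--     # Phase 2: format each run and join with single spaces.
--     return " ".join(
--         "<a href='#P%d'>%d</a>" % (s, s) if s == e
--         else "<a href='#P%d'>%d-%d</a>" % (s, s, e)
--         for s, e in runs)
-- ===== Notes on version B (the rewrite author's own statement) =====
-- stated objective: idiomatic
-- what changed: Replaces the index-based while-loop with nested inner scan and string accumulator by a two-phase pipeline: one structural pass materialising maximal consecutive runs as (start,end) pairs, then formatting each run and ' '.join-ing.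
import Mathlib
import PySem

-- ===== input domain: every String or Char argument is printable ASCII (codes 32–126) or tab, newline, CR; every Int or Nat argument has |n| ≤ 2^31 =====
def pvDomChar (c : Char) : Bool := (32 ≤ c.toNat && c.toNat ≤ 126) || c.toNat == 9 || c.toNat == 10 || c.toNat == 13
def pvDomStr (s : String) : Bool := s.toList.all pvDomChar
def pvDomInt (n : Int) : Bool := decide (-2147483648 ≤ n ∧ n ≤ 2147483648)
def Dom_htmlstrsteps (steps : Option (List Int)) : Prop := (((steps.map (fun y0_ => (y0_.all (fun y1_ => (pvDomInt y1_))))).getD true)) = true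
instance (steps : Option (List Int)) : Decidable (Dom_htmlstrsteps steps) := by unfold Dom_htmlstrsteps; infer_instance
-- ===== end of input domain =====

-- B replaces A's index/while string accumulator by a run-materialising pass plus a format-and-join pass (idiomatic decomposition; same cost).

-- ===== PORT A =====
-- inner while loop: 'while j < len(steps) and steps[j] == steps[j-1] + 1: j += 1'
def pvInnerA (steps : List Int) (j : Nat) : Nat :=
  if j < steps.length ∧ steps.getD j 0 = steps.getD (j - 1) 0 + 1 then
    pvInnerA steps (j + 1)
  else j
termination_by steps.length - j
decreasing_by omega

-- needed by pvLoopA's decreasing_by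
theorem pvInnerA_ge (steps : List Int) (j : Nat) : j ≤ pvInnerA steps j := by
  unfold pvInnerA
  split
  · exact le_trans (Nat.le_succ j) (pvInnerA_ge steps (j + 1))
  · exact le_refl j
termination_by steps.length - j
decreasing_by omega

-- outer while loop of A, state (i, result)
def pvLoopA (steps : List Int) (i : Nat) (result : String) : String :=
  if hi : i < steps.length then
    let r1 := if result ≠ "" then result ++ " " else result
    let r2 := r1 ++ "<a href='#P" ++ PySem.Int.toStr (steps.getD i 0) ++ "'>" ++
                PySem.Int.toStr (steps.getD i 0)
    let j := pvInnerA steps (i + 1)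
    let r3 := if i + 1 < j then r2 ++ "-" ++ PySem.Int.toStr (steps.getD (j - 1) 0) else r2
    pvLoopA steps j (r3 ++ "</a>")
  else result
termination_by steps.length - i
decreasing_by
  have := pvInnerA_ge steps (i + 1)
  omega

def htmlstrsteps (steps : Option (List Int)) : String :=
  match steps with
  | none => "[]"
  | some l => pvLoopA l 0 ""

-- ===== PORT B =====
-- format one (start, end) run
def pvFmt (p : Int × Int) : String :=
  if p.1 = p.2 then
    "<a href='#P" ++ PySem.Int.toStr p.1 ++ "'>" ++ PySem.Int.toStr p.1 ++ "</a>"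
  else
    "<a href='#P" ++ PySem.Int.toStr p.1 ++ "'>" ++ PySem.Int.toStr p.1 ++ "-" ++
      PySem.Int.toStr p.2 ++ "</a>"

-- loop body of B's run-collecting pass ('runs[-1] = …' / 'runs.append(…)')
def pvAddRun (runs : List (Int × Int)) (v : Int) : List (Int × Int) :=
  match runs.getLast? with
  | some (s, e) => if v = e + 1 then runs.dropLast ++ [(s, v)] else runs ++ [(v, v)]
  | none => runs ++ [(v, v)]

def htmlstrsteps_alt (steps : Option (List Int)) : String :=
  match steps with
  | none => "[]"
  | some l => PySem.Str.join " " ((l.foldl pvAddRun []).map pvFmt)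

-- ===== PRECONDITION & SPEC =====
def Spec_htmlstrsteps (steps : Option (List Int)) (out : String) : Prop := out = htmlstrsteps_alt steps
instance (steps : Option (List Int)) (out : String) : Decidable (Spec_htmlstrsteps steps out) := by unfold Spec_htmlstrsteps; infer_instance

-- ===== CLAIM (what is proved, stated in full; the proofs are below) =====
def Claim_equal_htmlstrsteps : Prop := ∀ (steps : Option (List Int)), Dom_htmlstrsteps steps → Spec_htmlstrsteps steps (htmlstrsteps steps)

-- ===== LEMMAS AND PROOFS =====

theorem pvInnerA_le (steps : List Int) (j : Nat) (h : j ≤ steps.length) :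
    pvInnerA steps j ≤ steps.length := by
  unfold pvInnerA
  split
  · next hc => exact pvInnerA_le steps (j + 1) (by omega)
  · exact h
termination_by steps.length - j
decreasing_by omega

-- canonical run decomposition used to bridge the two ports
def pvRunAux (cur : Int) (xs : List Int) : Int × List Int :=
  match xs with
  | [] => (cur, [])
  | y :: ys => if y = cur + 1 then pvRunAux y ys else (cur, y :: ys)

theorem pvRunAux_len (cur : Int) (xs : List Int) : (pvRunAux cur xs).2.length ≤ xs.length := by
  induction xs generalizing cur with
  | nil => simp [pvRunAux]
  | cons y ys ih =>
    simp only [pvRunAux]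
    split
    · exact le_trans (ih y) (Nat.le_succ _)
    · simp

def pvRuns : List Int → List (Int × Int)
  | [] => []
  | x :: xs => (x, (pvRunAux x xs).1) :: pvRuns (pvRunAux x xs).2
termination_by l => l.length
decreasing_by
  have := pvRunAux_len x xs
  simp
  omega

theorem pvRunAux_fst_ge (cur : Int) (xs : List Int) : cur ≤ (pvRunAux cur xs).1 := by
  induction xs generalizing cur with
  | nil => simp [pvRunAux]
  | cons y ys ih =>
    simp only [pvRunAux]
    split
    · next h => have := ih y; omega
    · simp

-- B's fold over the whole list produces exactly the canonical runs
theorem pvFoldl_addRun (xs : List Int) (pre : List (Int × Int)) (s e : Int) :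
    List.foldl pvAddRun (pre ++ [(s, e)]) xs =
      pre ++ (s, (pvRunAux e xs).1) :: pvRuns (pvRunAux e xs).2 := by
  induction xs generalizing pre s e with
  | nil => simp [pvRunAux, pvRuns]
  | cons y ys ih =>
    simp only [List.foldl_cons, pvAddRun, List.getLast?_concat, pvRunAux]
    split
    · next h =>
      rw [List.dropLast_concat, ih]
    · next h =>
      rw [ih]
      simp only [List.append_assoc, List.cons_append, List.nil_append]
      rw [pvRuns]

theorem pvFoldl_addRun_nil (l : List Int) : List.foldl pvAddRun [] l = pvRuns l := by
  cases l with
  | nil => simp [pvRuns]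
  | cons x xs =>
    have h1 : pvAddRun [] x = [(x, x)] := rfl
    rw [List.foldl_cons, h1, show ([(x, x)] : List (Int × Int)) = [] ++ [(x, x)] from rfl,
      pvFoldl_addRun]
    rw [pvRuns]
    simp

-- the inner while loop computes the canonical run boundary
theorem pvInnerA_runAux (steps : List Int) (j : Nat) (h1 : 1 ≤ j) (h2 : j ≤ steps.length) :
    pvRunAux (steps.getD (j - 1) 0) (steps.drop j) =
      (steps.getD (pvInnerA steps j - 1) 0, steps.drop (pvInnerA steps j)) := by
  rw [pvInnerA]
  split
  · next hc =>
    obtain ⟨hlt, heq⟩ := hc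
    have hg : steps.getD j 0 = steps[j] := List.getD_eq_getElem steps 0 hlt
    rw [List.drop_eq_getElem_cons hlt]
    simp only [pvRunAux]
    rw [if_pos (by rw [← hg]; exact heq)]
    have h3 := pvInnerA_runAux steps (j + 1) (by omega) (by omega)
    rw [Nat.add_sub_cancel] at h3
    rw [← hg]
    exact h3
  · next hc =>
    by_cases hlt : j < steps.length
    · have hne : ¬ steps.getD j 0 = steps.getD (j - 1) 0 + 1 := by tauto
      have hg : steps.getD j 0 = steps[j] := List.getD_eq_getElem steps 0 hlt
      rw [List.drop_eq_getElem_cons hlt]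
      simp only [pvRunAux]
      rw [if_neg (by rw [← hg]; exact hne)]
    · have hje : j = steps.length := by omega
      subst hje
      simp [pvRunAux]
termination_by steps.length - j
decreasing_by omega

-- what the outer loop produces from state (i, r)
def pvJoined (r : String) (rs : List (Int × Int)) : String :=
  match rs with
  | [] => r
  | _ => (if r = "" then "" else r ++ " ") ++ PySem.Str.join " " (rs.map pvFmt)

theorem pvJoin_cons₂ (x y : String) (l : List String) :
    PySem.Str.join " " (x :: y :: l) = x ++ (" " ++ PySem.Str.join " " (y :: l)) := by
  apply String.ext
  simp [PySem.Str.join, PySem.Chars.join, List.intercalate]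

theorem pvJoin_single (x : String) : PySem.Str.join " " [x] = x := by
  apply String.ext
  simp [PySem.Str.join, PySem.Chars.join, List.intercalate]

theorem pvFmt_ne_empty (p : Int × Int) : pvFmt p ≠ "" := by
  have h : 0 < (pvFmt p).length := by
    unfold pvFmt
    split <;> (simp [String.length_append]; exact Or.inr (by decide))
  intro he
  rw [he] at h
  simp at h

theorem pvAppend_ne_empty (a b : String) (hb : b ≠ "") : a ++ b ≠ "" := by
  intro he
  have h0 : (a ++ b).length = 0 := by rw [he]; rfl
  rw [String.length_append] at h0
  exact hb (String.length_eq_zero_iff.mp (by omega))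

theorem pvJoined_step (r : String) (p : Int × Int) (rs : List (Int × Int)) :
    pvJoined ((if r ≠ "" then r ++ " " else r) ++ pvFmt p) rs = pvJoined r (p :: rs) := by
  have hr1 : (if r ≠ "" then r ++ " " else r) = (if r = "" then "" else r ++ " ") := by
    by_cases h : r = "" <;> simp [h]
  cases rs with
  | nil =>
    simp only [pvJoined, hr1, List.map_cons, List.map_nil, pvJoin_single]
  | cons q qs =>
    have hne : (if r ≠ "" then r ++ " " else r) ++ pvFmt p ≠ "" :=
      pvAppend_ne_empty _ _ (pvFmt_ne_empty p)
    simp only [pvJoined, hr1, List.map_cons]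
    rw [if_neg (hr1 ▸ hne), pvJoin_cons₂]
    by_cases h : r = "" <;> simp [h, String.append_assoc]

-- one unfolding of the outer loop, lets resolved
theorem pvLoopA_step (steps : List Int) (i : Nat) (r : String) (hi : i < steps.length) :
    pvLoopA steps i r = pvLoopA steps (pvInnerA steps (i + 1))
      ((if r ≠ "" then r ++ " " else r) ++
        ("<a href='#P" ++ PySem.Int.toStr (steps.getD i 0) ++ "'>" ++
          PySem.Int.toStr (steps.getD i 0) ++
          (if i + 1 < pvInnerA steps (i + 1) then
            "-" ++ PySem.Int.toStr (steps.getD (pvInnerA steps (i + 1) - 1) 0) else "") ++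
          "</a>")) := by
  rw [pvLoopA, dif_pos hi]
  by_cases hd : i + 1 < pvInnerA steps (i + 1) <;>
    simp [hd, String.append_assoc]

-- the outer loop equals the canonical-run rendering
theorem pvLoopA_eq (steps : List Int) (i : Nat) (r : String) (h : i ≤ steps.length) :
    pvLoopA steps i r = pvJoined r (pvRuns (steps.drop i)) := by
  by_cases hi : i < steps.length
  · have hjge : i + 1 ≤ pvInnerA steps (i + 1) := pvInnerA_ge steps (i + 1)
    have hjle : pvInnerA steps (i + 1) ≤ steps.length := pvInnerA_le steps (i + 1) (by omega)
    have hg : steps.getD i 0 = steps[i] := List.getD_eq_getElem steps 0 hi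
    have hrun : pvRunAux (steps.getD i 0) (steps.drop (i + 1)) =
        (steps.getD (pvInnerA steps (i + 1) - 1) 0, steps.drop (pvInnerA steps (i + 1))) := by
      have h3 := pvInnerA_runAux steps (i + 1) (by omega) (by omega)
      rw [Nat.add_sub_cancel] at h3
      exact h3
    have hruns : pvRuns (steps.drop i) =
        (steps.getD i 0, steps.getD (pvInnerA steps (i + 1) - 1) 0) ::
          pvRuns (steps.drop (pvInnerA steps (i + 1))) := by
      rw [List.drop_eq_getElem_cons hi, ← hg, pvRuns, hrun]
    rw [pvLoopA_step steps i r hi, pvLoopA_eq steps (pvInnerA steps (i + 1)) _ hjle, hruns,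
      ← pvJoined_step r (steps.getD i 0, steps.getD (pvInnerA steps (i + 1) - 1) 0)]
    congr 1
    by_cases hd : i + 1 < pvInnerA steps (i + 1)
    · -- dash case: the run end is strictly greater than its start
      have hcond : i + 1 < steps.length ∧ steps.getD (i + 1) 0 = steps.getD i 0 + 1 := by
        by_contra hnc
        have : pvInnerA steps (i + 1) = i + 1 := by rw [pvInnerA, if_neg (by simpa using hnc)]
        omega
      obtain ⟨hlt1, heq1⟩ := hcond
      have hg1 : steps.getD (i + 1) 0 = steps[i + 1] := List.getD_eq_getElem steps 0 hlt1
      have hgt : steps.getD i 0 < steps.getD (pvInnerA steps (i + 1) - 1) 0 := by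
        have hstep : pvRunAux (steps.getD i 0) (steps.drop (i + 1)) =
            pvRunAux (steps.getD (i + 1) 0) (steps.drop (i + 2)) := by
          rw [List.drop_eq_getElem_cons hlt1, ← hg1]
          simp only [pvRunAux]
          rw [if_pos heq1]
        have hge := pvRunAux_fst_ge (steps.getD (i + 1) 0) (steps.drop (i + 2))
        rw [← hstep, hrun] at hge
        have hge' : steps.getD (i + 1) 0 ≤ steps.getD (pvInnerA steps (i + 1) - 1) 0 := hge
        omega
      rw [if_pos hd, pvFmt, if_neg (fun hc => (ne_of_lt hgt) hc)]
      congr 1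
      simp [String.append_assoc]
    · have hje : pvInnerA steps (i + 1) = i + 1 := by omega
      have hend : steps.getD (pvInnerA steps (i + 1) - 1) 0 = steps.getD i 0 := by
        rw [hje]; simp
      rw [if_neg hd, pvFmt, if_pos hend.symm]
      congr 1
      simp [String.append_assoc, String.append_empty]
  · have hje : i = steps.length := by omega
    rw [pvLoopA, dif_neg hi, hje, List.drop_length, pvRuns, pvJoined]
termination_by steps.length - i
decreasing_by
  have := pvInnerA_ge steps (i + 1)
  omega

theorem pvJoin_nil : PySem.Str.join " " ([] : List String) = "" := by decide

-- ===== VERDICT (by name: the statement is the Claim_ definition above) =====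
theorem htmlstrsteps_spec : Claim_equal_htmlstrsteps := by
  intro steps _
  unfold Spec_htmlstrsteps
  cases steps with
  | none => rfl
  | some l =>
    show pvLoopA l 0 "" = PySem.Str.join " " ((l.foldl pvAddRun []).map pvFmt)
    rw [pvFoldl_addRun_nil, pvLoopA_eq l 0 "" (by omega), List.drop_zero]
    cases h : pvRuns l with
    | nil => simp [pvJoined, pvJoin_nil]
    | cons q qs =>
      simp only [pvJoined]
      apply String.ext
      simp
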